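-- pv_equiv track=rewrite | github.com/n-ae/portfolio | fixml/python/fixml.py | normalize_whitespace_preserving_attributes
-- ===== SOURCE A (Python) =====
-- def normalize_whitespace_preserving_attributes(s: str) -> str:
--     """Normalize whitespace while preserving attribute values
--     Handles quoted strings and normalizes structural whitespace
--     """
--     if not s:
--         return s
--
--     # Quick check - if no quotes, use simple normalization
--     if '"' not in s and "'" not in s:
--         return ' '.join(s.split())
--
--     # Process character by character to preserve quoted content
--     result = []
--     in_quotes = False
--     quote_char = None
--     prev_space = False
--
--     quote_chars = {'"', "'"}
--     for c in s:
--         if not in_quotes and c in quote_chars: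
--             in_quotes = True
--             quote_char = c
--             result.append(c)
--             prev_space = False
--         elif in_quotes and c == quote_char:
--             in_quotes = False
--             result.append(c)
--             prev_space = False
--         elif in_quotes:
--             # Inside quotes: preserve all whitespace
--             result.append(c)
--             prev_space = False
--         elif c.isspace():
--             # Outside quotes: normalize whitespace
--             if not prev_space:
--                 result.append(' ')
--                 prev_space = True
--         else:
--             result.append(c)
--             prev_space = False
--
--     return ''.join(result).strip()
-- ===== SOURCE B (Python) =====
-- def _collapse(seg):
--     """Collapse whitespace runs in a quote-free chunk to single spaces."""
--     out = []
--     for ch in seg: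
--         if ch.isspace():
--             if not (out and out[-1] == ' '):
--                 out.append(' ')
--         else:
--             out.append(ch)
--     return ''.join(out)
--
--
-- def normalize_whitespace_preserving_attributes(s: str) -> str:
--     if not s:
--         return s
--     if '"' not in s and "'" not in s:
--         return ' '.join(s.split())
--     # Span-level pass: copy quoted spans verbatim, collapse the chunks between them.
--     out = []
--     i, n = 0, len(s)
--     while i < n:
--         c = s[i]
--         if c in '"\'':
--             j = s.find(c, i + 1)
--             if j == -1:
--                 out.append(s[i:])  # unmatched quote: keep the tail verbatim
--                 break
--             out.append(s[i:j + 1])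
--             i = j + 1
--         else:
--             j = i
--             while j < n and s[j] not in '"\'':
--                 j += 1
--             out.append(_collapse(s[i:j]))
--             i = j
--     return ''.join(out).strip()
-- ===== Notes on version B (the rewrite author's own statement) =====
-- stated objective: alternative
-- what changed: Replaced A's single per-character state machine (in_quotes/quote_char/prev_space flags) by a span-level pass that splits the string at quote characters, copies each quoted span verbatim (via find on the closing quote), and collapses whitespace runs in the quote-free chunks between them.
import Mathlib
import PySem

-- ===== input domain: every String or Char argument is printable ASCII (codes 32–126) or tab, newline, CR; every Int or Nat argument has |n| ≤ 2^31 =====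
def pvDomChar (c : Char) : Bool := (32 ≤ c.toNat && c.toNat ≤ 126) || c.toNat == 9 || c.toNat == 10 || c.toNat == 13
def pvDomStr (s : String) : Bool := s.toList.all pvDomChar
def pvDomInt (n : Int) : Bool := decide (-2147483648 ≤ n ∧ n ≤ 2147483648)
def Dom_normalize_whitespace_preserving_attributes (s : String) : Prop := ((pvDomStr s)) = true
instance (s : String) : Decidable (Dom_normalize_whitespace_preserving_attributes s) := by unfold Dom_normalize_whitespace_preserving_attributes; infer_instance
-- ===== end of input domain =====

-- B replaces A's per-character in_quotes/prev_space state machine by a span-level pass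
-- (copy quoted spans verbatim, collapse the quote-free chunks between them); objective: alternative.

-- ===== PORT A =====
-- the body of A's for-loop: state (in_quotes, quote_char, prev_space, result)
def pvStepA (st : Bool × Option Char × Bool × List Char) (c : Char) :
    Bool × Option Char × Bool × List Char :=
  match st with
  | (inQ, qc, ps, res) =>
    if !inQ && (c == '"' || c == '\'') then (true, some c, false, res ++ [c])
    else if inQ && (some c == qc) then (false, qc, false, res ++ [c])
    else if inQ then (inQ, qc, false, res ++ [c])
    else if PySem.Chars.isspace c then
      (if ps then (inQ, qc, ps, res) else (inQ, qc, true, res ++ [' ']))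
    else (inQ, qc, false, res ++ [c])

def normalize_whitespace_preserving_attributes (s : String) : String :=
  if s.toList.isEmpty then s
  else if !(PySem.Str.isIn "\"" s) && !(PySem.Str.isIn "'" s) then
    String.ofList (PySem.Chars.join [' '] (PySem.Chars.split₀ s.toList))
  else
    let fin := s.toList.foldl pvStepA (false, none, false, [])
    String.ofList (PySem.Chars.strip fin.2.2.2)

-- ===== PORT B =====
-- Source B's inner scan `while j < n and s[j] not in '"\''` : split the suffix at the first quote
def pvSpanNQ : List Char → List Char × List Char
  | [] => ([], [])
  | c :: cs =>
    if c == '"' || c == '\'' then ([], c :: cs)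
    else
      let p := pvSpanNQ cs
      (c :: p.1, p.2)

theorem pvSpanNQ_snd_len_le (l : List Char) : (pvSpanNQ l).2.length ≤ l.length := by
  induction l with
  | nil => simp [pvSpanNQ]
  | cons c cs ih =>
    simp only [pvSpanNQ]
    split
    · simp
    · simpa using Nat.le_succ_of_le ih

-- Source B's _collapse: for-loop appending to out, peeking at out[-1]
def pvCollapse (seg : List Char) : List Char :=
  seg.foldl
    (fun out ch =>
      if PySem.Chars.isspace ch then
        (if out.getLast? == some ' ' then out else out ++ [' '])
      else out ++ [ch]) []

-- Source B's main while-loop over the remaining suffix; `s.find(c, i+1)` on the suffix is the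
-- first occurrence of c in the tail, i.e. PySem.List.index?
def pvProcess : List Char → List Char
  | [] => []
  | c :: cs =>
    if c == '"' || c == '\'' then
      match PySem.List.index? cs c with
      | some j => c :: (cs.take j ++ [c] ++ pvProcess (cs.drop (j + 1)))
      | none => c :: cs  -- unmatched quote: keep the tail verbatim
    else
      let p := pvSpanNQ (c :: cs)
      pvCollapse p.1 ++ pvProcess p.2
termination_by l => l.length
decreasing_by
  · have := List.length_drop (l := cs) (i := j + 1)
    simp only [this, List.length_cons]
    omega
  · simp only [pvSpanNQ, *]
    split
    · simp_all
    · have := pvSpanNQ_snd_len_le cs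
      simp only [List.length_cons]
      omega

def normalize_whitespace_preserving_attributes_alt (s : String) : String :=
  if s.toList.isEmpty then s
  else if !(PySem.Str.isIn "\"" s) && !(PySem.Str.isIn "'" s) then
    String.ofList (PySem.Chars.join [' '] (PySem.Chars.split₀ s.toList))
  else
    String.ofList (PySem.Chars.strip (pvProcess s.toList))

-- ===== PRECONDITION & SPEC =====
def Spec_normalize_whitespace_preserving_attributes (s : String) (out : String) : Prop := out = normalize_whitespace_preserving_attributes_alt s
instance (s : String) (out : String) : Decidable (Spec_normalize_whitespace_preserving_attributes s out) := by unfold Spec_normalize_whitespace_preserving_attributes; infer_instance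

-- ===== CLAIM (what is proved, stated in full; the proofs are below) =====
def Claim_equal_normalize_whitespace_preserving_attributes : Prop := ∀ (s : String), Dom_normalize_whitespace_preserving_attributes s → Spec_normalize_whitespace_preserving_attributes s (normalize_whitespace_preserving_attributes s)

-- ===== LEMMAS AND PROOFS =====

-- reference form of A's machine: M = outside quotes (flag ps), Q = inside quotes (opened by q)
mutual
def pvM : List Char → Bool → List Char
  | [], _ => []
  | c :: cs, ps =>
    if c == '"' || c == '\'' then c :: pvQ cs c
    else if PySem.Chars.isspace c then
      (if ps then pvM cs true else ' ' :: pvM cs true)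
    else c :: pvM cs false
def pvQ : List Char → Char → List Char
  | [], _ => []
  | c :: cs, q => if c == q then c :: pvM cs false else c :: pvQ cs q
end

-- A's foldl, started outside (resp. inside) quotes, is M (resp. Q)
theorem pvFoldA (l : List Char) : ∀ (res : List Char),
    (∀ (qc : Option Char) (ps : Bool),
      (l.foldl pvStepA (false, qc, ps, res)).2.2.2 = res ++ pvM l ps)
  ∧ (∀ (q : Char) (ps : Bool),
      (l.foldl pvStepA (true, some q, ps, res)).2.2.2 = res ++ pvQ l q) := by
  induction l with
  | nil => intro res; constructor <;> intro _ _ <;> simp [pvM, pvQ]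
  | cons c cs ih =>
    intro res
    constructor
    · intro qc ps
      by_cases hq : (c == '"' || c == '\'') = true
      · simp only [List.foldl_cons, pvStepA, hq, Bool.not_false, Bool.true_and, if_true,
          pvM, (ih (res ++ [c])).2 c false]
        simp
      · by_cases hs : PySem.Chars.isspace c = true
        · cases ps with
          | true =>
            simp only [List.foldl_cons, pvStepA, hq, hs, pvM]
            simp [(ih res).1 qc true]
          | false =>
            simp only [List.foldl_cons, pvStepA, hq, hs, pvM]
            simp [(ih (res ++ [' '])).1 qc true]
        · simp only [List.foldl_cons, pvStepA, hq, hs, pvM]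
          simp [(ih (res ++ [c])).1 qc false]
    · intro q ps
      by_cases he : (c == q) = true
      · have hcq : c = q := by simpa using he
        simp only [List.foldl_cons, pvStepA, pvQ, he]
        subst hcq
        simp [(ih (res ++ [c])).1 (some c) false]
      · simp only [List.foldl_cons, pvStepA, pvQ, he]
        have : (some c == some q) = false := by simpa using he
        simp [this, (ih (res ++ [c])).2 q false]

-- Q on a quote-free list (unmatched quote) is the identity
theorem pvQ_no (cs : List Char) (q : Char) (h : q ∉ cs) : pvQ cs q = cs := by
  induction cs with
  | nil => simp [pvQ]
  | cons c cs ih =>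
    have hcq : (c == q) = false := by
      simp only [beq_eq_false_iff_ne]; rintro rfl; exact h (List.mem_cons_self)
    simp [pvQ, hcq, ih (fun hm => h (List.mem_cons_of_mem _ hm))]

-- Q up to the closing quote, then back to M with a fresh flag
theorem pvQ_split (pre suf : List Char) (q : Char) (h : q ∉ pre) :
    pvQ (pre ++ q :: suf) q = pre ++ q :: pvM suf false := by
  induction pre with
  | nil => simp [pvQ]
  | cons c cs ih =>
    have hcq : (c == q) = false := by
      simp only [beq_eq_false_iff_ne]; rintro rfl; exact h (List.mem_cons_self)
    simp [pvQ, hcq, ih (fun hm => h (List.mem_cons_of_mem _ hm))]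

theorem pvSpanNQ_append (l : List Char) : (pvSpanNQ l).1 ++ (pvSpanNQ l).2 = l := by
  induction l with
  | nil => simp [pvSpanNQ]
  | cons c cs ih =>
    simp only [pvSpanNQ]
    split
    · simp
    · simpa using ih

theorem pvSpanNQ_fst_nq (l : List Char) :
    ∀ x ∈ (pvSpanNQ l).1, (x == '"' || x == '\'') = false := by
  induction l with
  | nil => simp [pvSpanNQ]
  | cons c cs ih =>
    simp only [pvSpanNQ]
    split
    · simp
    · intro x hx
      rcases List.mem_cons.mp hx with rfl | hx
      · simpa using by simp_all
      · exact ih x hx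

theorem pvSpanNQ_snd_head (l : List Char) :
    (pvSpanNQ l).2 = [] ∨ ∃ d ds, (pvSpanNQ l).2 = d :: ds ∧ (d == '"' || d == '\'') = true := by
  induction l with
  | nil => simp [pvSpanNQ]
  | cons c cs ih =>
    simp only [pvSpanNQ]
    split
    · exact Or.inr ⟨c, cs, rfl, by assumption⟩
    · simpa using ih

-- the outside-quote collapse with an explicit flag (A's prev_space)
def pvCps : List Char → Bool → List Char
  | [], _ => []
  | c :: cs, ps =>
    if PySem.Chars.isspace c then
      (if ps then pvCps cs true else ' ' :: pvCps cs true)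
    else c :: pvCps cs false

theorem pvM_quoteHead (rest : List Char) (ps : Bool)
    (h : rest = [] ∨ ∃ d ds, rest = d :: ds ∧ (d == '"' || d == '\'') = true) :
    pvM rest ps = pvM rest false := by
  rcases h with rfl | ⟨d, ds, rfl, hd⟩
  · rfl
  · simp [pvM, hd]

theorem pvM_append (seg : List Char)
    (hseg : ∀ x ∈ seg, (x == '"' || x == '\'') = false) (rest : List Char)
    (hrest : rest = [] ∨ ∃ d ds, rest = d :: ds ∧ (d == '"' || d == '\'') = true) :
    ∀ ps, pvM (seg ++ rest) ps = pvCps seg ps ++ pvM rest false := by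
  induction seg with
  | nil => intro ps; simpa [pvCps] using pvM_quoteHead rest ps hrest
  | cons c cs ih =>
    intro ps
    have hc := hseg c List.mem_cons_self
    have ih' := ih (fun x hx => hseg x (List.mem_cons_of_mem _ hx))
    by_cases hs : PySem.Chars.isspace c = true
    · cases ps <;> simp [pvM, pvCps, hc, hs, ih']
    · simp [pvM, pvCps, hc, hs, ih']

theorem pvCollapse_inv (seg : List Char) :
    ∀ (out : List Char) (ps : Bool), (out.getLast? == some ' ') = ps →
    seg.foldl
      (fun out ch =>
        if PySem.Chars.isspace ch then
          (if out.getLast? == some ' ' then out else out ++ [' '])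
        else out ++ [ch]) out = out ++ pvCps seg ps := by
  induction seg with
  | nil => intro out ps _; simp [pvCps]
  | cons c cs ih =>
    intro out ps hinv
    by_cases hs : PySem.Chars.isspace c = true
    · cases ps with
      | true =>
        simp only [List.foldl_cons, hs, if_true, hinv, pvCps]
        exact ih out true hinv
      | false =>
        simp only [List.foldl_cons, hs, if_true, hinv, pvCps]
        have : ((out ++ [' ']).getLast? == some ' ') = true := by simp
        simpa using ih (out ++ [' ']) true this
    · have hc : (' ' = c) → False := by
        rintro rfl; exact hs (by decide)
      simp only [List.foldl_cons, hs, pvCps]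
      have : ((out ++ [c]).getLast? == some ' ') = false := by
        simp only [List.getLast?_concat, beq_eq_false_iff_ne, ne_eq, Option.some.injEq]
        exact fun h => hc h.symm
      simpa using ih (out ++ [c]) false this

theorem pvCollapse_eq (seg : List Char) : pvCollapse seg = pvCps seg false := by
  have h := pvCollapse_inv seg [] false (by simp)
  simp only [List.nil_append] at h
  simpa [pvCollapse] using h

theorem pvProcess_eq : ∀ (n : Nat) (l : List Char), l.length ≤ n → pvProcess l = pvM l false := by
  intro n
  induction n with
  | zero =>
    intro l hl
    have : l = [] := List.eq_nil_of_length_eq_zero (Nat.le_zero.mp hl)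
    subst this; simp [pvProcess, pvM]
  | succ n ih =>
    intro l hl
    cases l with
    | nil => simp [pvProcess, pvM]
    | cons c cs =>
      by_cases hq : (c == '"' || c == '\'') = true
      · rcases hidx : PySem.List.index? cs c with _ | j
        · have hno : c ∉ cs := (PySem.List.index?_eq_none_iff cs c).mp hidx
          have hidx' : List.idxOf? c cs = none := by simpa using hidx
          simp [pvProcess, pvM, hq, hidx', pvQ_no cs c hno]
        · obtain ⟨pre, suf, hcs, hlen, hnot⟩ := (PySem.List.index?_eq_some_iff cs c j).mp hidx
          subst hcs
          have htake : (pre ++ c :: suf).take j = pre := by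
            subst hlen; exact List.take_left (l₁ := pre) (l₂ := c :: suf)
          have hdrop : (pre ++ c :: suf).drop (j + 1) = suf := by
            subst hlen
            have h : pre ++ c :: suf = (pre ++ [c]) ++ suf := by simp
            rw [h]
            exact List.drop_left' (by simp)
          have hsuf : suf.length ≤ n := by
            have := hl
            simp only [List.length_cons, List.length_append] at this
            omega
          simp only [pvProcess, hq, if_true]
          rw [hidx]
          simp only [htake, hdrop, ih suf hsuf, pvM, hq, pvQ_split pre suf c hnot]
          simp
      · have hspan : pvSpanNQ (c :: cs) = (c :: (pvSpanNQ cs).1, (pvSpanNQ cs).2) := by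
          simp [pvSpanNQ, hq]
        have hrest : (pvSpanNQ cs).2.length ≤ n := by
          have := pvSpanNQ_snd_len_le cs
          simp only [List.length_cons] at hl
          omega
        have happ := pvSpanNQ_append (c :: cs)
        rw [hspan] at happ
        have hM : pvM (c :: cs) false
            = pvCps (c :: (pvSpanNQ cs).1) false ++ pvM (pvSpanNQ cs).2 false := by
          conv_lhs => rw [← happ]
          refine pvM_append _ ?_ _ ?_ false
          · have := pvSpanNQ_fst_nq (c :: cs)
            rw [hspan] at this
            exact this
          · have := pvSpanNQ_snd_head (c :: cs)
            rw [hspan] at this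
            exact this
        simp only [pvProcess, hq, hspan, hM, pvCollapse_eq, ih _ hrest]
        simp
  
-- ===== VERDICT (by name: the statement is the Claim_ definition above) =====
theorem normalize_whitespace_preserving_attributes_spec : Claim_equal_normalize_whitespace_preserving_attributes := by
  intro s _
  unfold Spec_normalize_whitespace_preserving_attributes
  unfold normalize_whitespace_preserving_attributes normalize_whitespace_preserving_attributes_alt
  have hF := (pvFoldA s.toList []).1 none false
  simp only [List.nil_append] at hF
  have hP := pvProcess_eq s.toList.length s.toList (Nat.le_refl _)
  by_cases h0 : s.toList.isEmpty = true
  · simp [h0]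
  · cases hin1 : PySem.Str.isIn "\"" s <;> cases hin2 : PySem.Str.isIn "'" s <;>
      simp [h0, hF, hP]
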